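-- pv_equiv track=rewrite | github.com/Abjad/abjad | abjad/tools/segmenttools/Tags.py | has_default_tag
-- ===== SOURCE A (Python) =====
-- def has_default_tag(string: str) -> bool:
--     r'''Is true when ``string`` has default tag.
--
--     ..  container:: example
--
--         >>> abjad.tags.has_persistence_tag('')
--         False
--
--         >>> abjad.tags.has_persistence_tag('FOO')
--         False
--
--         >>> abjad.tags.has_persistence_tag('FOO:DEFAULT_CLEF')
--         True
--
--         >>> abjad.tags.has_persistence_tag('DEFAULT_CLEF')
--         True
--
--     '''
--     if not isinstance(string, str):
--         return False
--     words = string.split(':')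
--     for word in words:
--         if word.startswith('DEFAULT'):
--             return True
--     return False
-- ===== SOURCE B (Python) =====
-- def has_default_tag(string: str) -> bool:
--     if not isinstance(string, str):
--         return False
--     return string.startswith('DEFAULT') or ':DEFAULT' in string
-- ===== Notes on version B (the rewrite author's own statement) =====
-- stated objective: idiomatic
-- what changed: Replaces tokenizing on the colon separator and scanning the word list with a direct prefix test plus a single substring-membership test (colon followed by the tag prefix), eliminating the split and the explicit loop.
import Mathlib
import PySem

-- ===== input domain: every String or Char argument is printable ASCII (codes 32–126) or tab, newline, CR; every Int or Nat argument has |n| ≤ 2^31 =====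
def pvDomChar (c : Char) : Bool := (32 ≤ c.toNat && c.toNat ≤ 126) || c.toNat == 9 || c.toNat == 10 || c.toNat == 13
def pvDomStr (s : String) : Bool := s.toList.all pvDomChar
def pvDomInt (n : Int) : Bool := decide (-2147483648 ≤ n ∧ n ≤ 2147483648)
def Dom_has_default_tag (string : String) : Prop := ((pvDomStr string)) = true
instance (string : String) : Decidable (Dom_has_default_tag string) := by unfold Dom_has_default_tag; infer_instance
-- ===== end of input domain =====

-- B replaces A's split-and-scan by a prefix test plus one substring-membership test (idiomatic).

-- ===== PORT A =====
def has_default_tag (string : String) : Bool :=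
  match PySem.Str.split? string ":" with
  | none => false   -- unreachable: the separator ":" is nonempty
  | some words => words.any (fun word => PySem.Str.startswith word "DEFAULT")

-- ===== PORT B =====
def has_default_tag_alt (string : String) : Bool :=
  PySem.Str.startswith string "DEFAULT" || PySem.Str.isIn ":DEFAULT" string

-- ===== PRECONDITION & SPEC =====
def Spec_has_default_tag (string : String) (out : Bool) : Prop := out = has_default_tag_alt string
instance (string : String) (out : Bool) : Decidable (Spec_has_default_tag string out) := by unfold Spec_has_default_tag; infer_instance

-- ===== CLAIM (what is proved, stated in full; the proofs are below) =====
def Claim_equal_has_default_tag : Prop := ∀ (string : String), Dom_has_default_tag string → Spec_has_default_tag string (has_default_tag string)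

-- ===== LEMMAS AND PROOFS =====

-- A colon-free pattern is a prefix of `w ++ ':' :: r` iff it is a prefix of `w`.
lemma prefix_append_colon (D : List Char) (hD : ':' ∉ D) :
    ∀ (w r : List Char), D <+: w ++ ':' :: r ↔ D <+: w := by
  induction D with
  | nil => intro w r; simp
  | cons d D ih =>
    intro w r
    cases w with
    | nil =>
      simp only [List.nil_append, List.cons_prefix_cons]
      constructor
      · rintro ⟨rfl, -⟩; exact absurd (List.mem_cons_self) hD
      · rintro h; exact absurd h (by simp)
    | cons a w' =>
      simp only [List.cons_append, List.cons_prefix_cons]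
      have hD' : ':' ∉ D := fun h => hD (List.mem_cons_of_mem _ h)
      rw [ih hD' w' r]

-- The loop of A over splitOn's words, characterised as B's two tests.
lemma go_any (D : List Char) (hD : ':' ∉ D) :
    ∀ (fuel : Nat) (l cur : List Char) (acc : List (List Char)), l.length < fuel →
      ((PySem.Chars.splitOn.go [':'] fuel l cur acc).any
          (fun w => PySem.Chars.startswith w D))
        = (acc.any (fun w => PySem.Chars.startswith w D)
            || PySem.Chars.startswith (cur.reverse ++ l) D
            || PySem.Chars.isIn (':' :: D) l) := by
  intro fuel
  induction fuel with
  | zero => intro l cur acc h; omega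
  | succ n ih =>
    intro l cur acc h
    cases l with
    | nil =>
      simp only [PySem.Chars.splitOn.go, List.any_reverse, List.any_cons, List.append_nil]
      have hin : PySem.Chars.isIn (':' :: D) [] = false := by
        rw [PySem.Chars.isIn_eq_false_iff]
        intro hinf
        have := hinf.length_le
        simp at this
      rw [hin]
      cases acc.any (fun w => PySem.Chars.startswith w D) <;>
        cases PySem.Chars.startswith cur.reverse D <;> simp
    | cons c rest =>
      by_cases hc : c = ':'
      · subst hc
        have hstep : PySem.Chars.splitOn.go [':'] (n+1) (':' :: rest) cur acc
            = PySem.Chars.splitOn.go [':'] n rest [] (cur.reverse :: acc) := by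
          simp [PySem.Chars.splitOn.go, List.isPrefixOf]
        rw [hstep, ih rest [] (cur.reverse :: acc) (by simp at h ⊢; omega)]
        rw [Bool.eq_iff_iff]
        simp only [List.any_cons, Bool.or_eq_true,
          PySem.Chars.startswith_iff, PySem.Chars.isIn_iff_infix,
          prefix_append_colon D hD cur.reverse rest, List.infix_cons_iff,
          List.cons_prefix_cons, true_and]
        tauto
      · have hstep : PySem.Chars.splitOn.go [':'] (n+1) (c :: rest) cur acc
            = PySem.Chars.splitOn.go [':'] n rest (c :: cur) acc := by
          simp only [PySem.Chars.splitOn.go, List.isPrefixOf, Bool.and_eq_true, beq_iff_eq]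
          split
          · rename_i hcc
            exact absurd hcc.1.symm hc
          · rfl
        rw [hstep, ih rest (c :: cur) acc (by simp at h ⊢; omega)]
        rw [Bool.eq_iff_iff]
        have hc' : ¬ (':' = c) := fun h1 => hc h1.symm
        simp only [Bool.or_eq_true, PySem.Chars.startswith_iff,
          PySem.Chars.isIn_iff_infix, List.reverse_cons, List.append_assoc,
          List.cons_append, List.nil_append, List.infix_cons_iff,
          List.cons_prefix_cons]
        tauto

-- ===== VERDICT (by name: the statement is the Claim_ definition above) =====
theorem has_default_tag_spec : Claim_equal_has_default_tag := by
  intro string _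
  unfold Spec_has_default_tag has_default_tag has_default_tag_alt
  have hcolon : (":" : String).toList = [':'] := by decide
  have hpat : (":DEFAULT" : String).toList = ':' :: ("DEFAULT" : String).toList := by decide
  have hD : ':' ∉ ("DEFAULT" : String).toList := by decide
  simp only [PySem.Str.split?, PySem.Chars.split?, hcolon, List.isEmpty_cons,
    Bool.false_eq_true, if_false, Option.map_some, List.any_map,
    PySem.Str.startswith_eq, PySem.Str.isIn_eq, hpat]
  unfold PySem.Chars.splitOn
  simp only [Function.comp_def, String.toList_ofList]
  rw [go_any ("DEFAULT" : String).toList hD (string.toList.length + 1) string.toList [] []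
    (by omega)]
  simp
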